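-- pv_equiv track=rewrite | github.com/Radi8ion/Adobe_1B | main.py | extract_domain_keywords
-- ===== SOURCE A (Python) =====
-- def extract_domain_keywords(section_title):
--     """Extract relevant keywords based on section title patterns"""
--     title_lower = section_title.lower()
--     keywords = []
--
--     # Academic/Research keywords
--     if any(word in title_lower for word in ['method', 'approach', 'algorithm']):
--         keywords.extend(['methodology', 'implementation', 'evaluation'])
--
--     if any(word in title_lower for word in ['result', 'finding', 'analysis']):
--         keywords.extend(['data', 'performance', 'metrics', 'comparison'])
--
--     if any(word in title_lower for word in ['introduction', 'background']):
--         keywords.extend(['context', 'motivation', 'objectives'])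
--
--     if any(word in title_lower for word in ['conclusion', 'discussion']):
--         keywords.extend(['implications', 'limitations', 'future work'])
--
--     # Business keywords
--     if any(word in title_lower for word in ['revenue', 'financial', 'market']):
--         keywords.extend(['growth', 'trends', 'performance', 'strategy'])
--
--     # Technical keywords
--     if any(word in title_lower for word in ['system', 'architecture', 'design']):
--         keywords.extend(['implementation', 'components', 'integration'])
--
--     return keywords[:5]  # Limit to top 5 keywords
-- ===== SOURCE B (Python) =====
-- RULES = [
--     (['method', 'approach', 'algorithm'], ['methodology', 'implementation', 'evaluation']),
--     (['result', 'finding', 'analysis'], ['data', 'performance', 'metrics', 'comparison']),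
--     (['introduction', 'background'], ['context', 'motivation', 'objectives']),
--     (['conclusion', 'discussion'], ['implications', 'limitations', 'future work']),
--     (['revenue', 'financial', 'market'], ['growth', 'trends', 'performance', 'strategy']),
--     (['system', 'architecture', 'design'], ['implementation', 'components', 'integration']),
-- ]
--
-- def extract_domain_keywords(section_title):
--     title_lower = section_title.lower()
--
--     def collect(rules, budget):
--         # stop as soon as the budget of 5 keywords is exhausted; no final slice
--         if budget == 0 or not rules:
--             return []
--         triggers, additions = rules[0]
--         if any(word in title_lower for word in triggers):
--             taken = additions[:budget]
--             return taken + collect(rules[1:], budget - len(taken))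
--         return collect(rules[1:], budget)
--
--     return collect(RULES, 5)
-- ===== Notes on version B (the rewrite author's own statement) =====
-- stated objective: alternative
-- what changed: Replaces A's six inline if-blocks plus a final [:5] slice by a budgeted recursion over a rule table that takes at most the remaining budget from each matching rule and stops early once 5 keywords are collected, never building the full list.
import Mathlib
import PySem

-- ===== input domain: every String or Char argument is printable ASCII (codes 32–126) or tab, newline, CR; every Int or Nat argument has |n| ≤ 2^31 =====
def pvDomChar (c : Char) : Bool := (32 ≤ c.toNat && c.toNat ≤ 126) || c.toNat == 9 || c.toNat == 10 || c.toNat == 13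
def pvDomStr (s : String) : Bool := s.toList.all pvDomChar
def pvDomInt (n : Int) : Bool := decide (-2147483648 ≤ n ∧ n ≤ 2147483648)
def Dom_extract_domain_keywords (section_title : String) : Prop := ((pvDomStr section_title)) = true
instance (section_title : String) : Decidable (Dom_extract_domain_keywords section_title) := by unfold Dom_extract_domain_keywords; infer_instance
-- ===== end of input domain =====

-- B replaces A's six inline if-blocks plus a final [:5] slice by a budgeted recursion over a
-- rule table that stops early once 5 keywords are collected (alternative decomposition).

-- ===== PORT A =====
def extract_domain_keywords (section_title : String) : List String :=
  let title_lower := PySem.Str.lower section_title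
  let keywords : List String := []
  let keywords := if ["method", "approach", "algorithm"].any (fun w => PySem.Str.isIn w title_lower)
    then keywords ++ ["methodology", "implementation", "evaluation"] else keywords
  let keywords := if ["result", "finding", "analysis"].any (fun w => PySem.Str.isIn w title_lower)
    then keywords ++ ["data", "performance", "metrics", "comparison"] else keywords
  let keywords := if ["introduction", "background"].any (fun w => PySem.Str.isIn w title_lower)
    then keywords ++ ["context", "motivation", "objectives"] else keywords
  let keywords := if ["conclusion", "discussion"].any (fun w => PySem.Str.isIn w title_lower)
    then keywords ++ ["implications", "limitations", "future work"] else keywords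
  let keywords := if ["revenue", "financial", "market"].any (fun w => PySem.Str.isIn w title_lower)
    then keywords ++ ["growth", "trends", "performance", "strategy"] else keywords
  let keywords := if ["system", "architecture", "design"].any (fun w => PySem.Str.isIn w title_lower)
    then keywords ++ ["implementation", "components", "integration"] else keywords
  PySem.List.slice keywords none (some 5)

-- ===== PORT B =====
def pvRules : List (List String × List String) :=
  [ (["method", "approach", "algorithm"], ["methodology", "implementation", "evaluation"]),
    (["result", "finding", "analysis"], ["data", "performance", "metrics", "comparison"]),
    (["introduction", "background"], ["context", "motivation", "objectives"]),
    (["conclusion", "discussion"], ["implications", "limitations", "future work"]),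
    (["revenue", "financial", "market"], ["growth", "trends", "performance", "strategy"]),
    (["system", "architecture", "design"], ["implementation", "components", "integration"]) ]

-- Source B's inner 'collect': budgeted recursion, taking additions[:budget] per matching rule,
-- stopping when the budget is exhausted.
def pvCollect (title_lower : String) : List (List String × List String) → Nat → List String
  | _, 0 => []
  | [], _ => []
  | (triggers, additions) :: rest, Nat.succ b =>
    if triggers.any (fun w => PySem.Str.isIn w title_lower) then
      let taken := additions.take (Nat.succ b)
      taken ++ pvCollect title_lower rest (Nat.succ b - taken.length)
    else pvCollect title_lower rest (Nat.succ b)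

def extract_domain_keywords_alt (section_title : String) : List String :=
  let title_lower := PySem.Str.lower section_title
  pvCollect title_lower pvRules 5

-- ===== PRECONDITION & SPEC =====
def Spec_extract_domain_keywords (section_title : String) (out : List String) : Prop := out = extract_domain_keywords_alt section_title
instance (section_title : String) (out : List String) : Decidable (Spec_extract_domain_keywords section_title out) := by unfold Spec_extract_domain_keywords; infer_instance

-- ===== CLAIM =====
def Claim_equal_extract_domain_keywords : Prop := ∀ (section_title : String), Dom_extract_domain_keywords section_title → Spec_extract_domain_keywords section_title (extract_domain_keywords section_title)

-- ===== LEMMAS AND PROOFS =====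
-- the list of keywords a rule contributes (all of them, before any budget/truncation)
def pvGather (t : String) : List (List String × List String) → List String
  | [] => []
  | (triggers, additions) :: rest =>
    (if triggers.any (fun w => PySem.Str.isIn w t) then additions else []) ++ pvGather t rest

theorem pvCollect_eq_take (t : String) (rules : List (List String × List String)) (n : Nat) :
    pvCollect t rules n = (pvGather t rules).take n := by
  induction rules generalizing n with
  | nil => cases n <;> simp [pvCollect, pvGather]
  | cons r rest ih =>
    obtain ⟨triggers, additions⟩ := r
    cases n with
    | zero => simp [pvCollect]
    | succ b =>
      by_cases h : triggers.any (fun w => PySem.Str.isIn w t) = true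
      · simp only [pvCollect, pvGather, h, if_pos, ih, List.take_append,
          List.length_take]
        have : Nat.succ b - min (Nat.succ b) additions.length
            = Nat.succ b - additions.length := by omega
        rw [this]
      · simp only [pvCollect, pvGather, h, Bool.false_eq_true, if_false, ih, List.nil_append]

theorem pv_equal (s : String) :
    extract_domain_keywords s = extract_domain_keywords_alt s := by
  unfold extract_domain_keywords extract_domain_keywords_alt
  rw [pvCollect_eq_take]
  simp only [pvGather, pvRules, List.append_nil]
  rw [show ((5 : Int)) = ((5 : Nat) : Int) from rfl, PySem.List.slice_to_natCast]
  split_ifs <;> rfl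

-- ===== VERDICT =====
theorem extract_domain_keywords_spec : Claim_equal_extract_domain_keywords := by
  intro s _
  exact pv_equal s
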